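-- pv_equiv track=rewrite | github.com/oa1992/covid-misinformation-severity | utils/zero_shot_utils.py | sort_on_topic
-- ===== SOURCE A (Python) =====
-- def sort_on_topic(tweet_anno_dict):
--     topic_dict = {}
--
--     for id in tweet_anno_dict.keys():
--         topic = tweet_anno_dict[id]['topic']
--         if topic not in topic_dict.keys():
--             topic_dict[topic] = []
--
--         topic_dict[topic].append(id)
--
--     temp_list = []
--     for topic in topic_dict.keys():
--         temp_list.append(topic_dict[topic])
--
--
--     temp_list.sort(key=len, reverse=True)
--     sorted_ids = []
--     for list in temp_list:
--         sorted_ids.extend(list)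
--
--     return sorted_ids
-- ===== SOURCE B (Python) =====
-- def sort_on_topic(tweet_anno_dict):
--     count = {}
--     first_index = {}
--     for i, id in enumerate(tweet_anno_dict.keys()):
--         topic = tweet_anno_dict[id]['topic']
--         if topic not in count:
--             count[topic] = 0
--             first_index[topic] = i
--         count[topic] += 1
--     return sorted(tweet_anno_dict.keys(),
--                   key=lambda id: (-count[tweet_anno_dict[id]['topic']],
--                                   first_index[tweet_anno_dict[id]['topic']]))
-- ===== Notes on version B (the rewrite author's own statement) =====
-- stated objective: alternative
-- what changed: A groups ids into per-topic lists, sorts the list of groups by size (stable, reverse) and concatenates; B instead makes one counting pass recording each topic's count and first-appearance index and then does a single stable sort of all ids by the key (-count(topic), first_index(topic)).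
import Mathlib
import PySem

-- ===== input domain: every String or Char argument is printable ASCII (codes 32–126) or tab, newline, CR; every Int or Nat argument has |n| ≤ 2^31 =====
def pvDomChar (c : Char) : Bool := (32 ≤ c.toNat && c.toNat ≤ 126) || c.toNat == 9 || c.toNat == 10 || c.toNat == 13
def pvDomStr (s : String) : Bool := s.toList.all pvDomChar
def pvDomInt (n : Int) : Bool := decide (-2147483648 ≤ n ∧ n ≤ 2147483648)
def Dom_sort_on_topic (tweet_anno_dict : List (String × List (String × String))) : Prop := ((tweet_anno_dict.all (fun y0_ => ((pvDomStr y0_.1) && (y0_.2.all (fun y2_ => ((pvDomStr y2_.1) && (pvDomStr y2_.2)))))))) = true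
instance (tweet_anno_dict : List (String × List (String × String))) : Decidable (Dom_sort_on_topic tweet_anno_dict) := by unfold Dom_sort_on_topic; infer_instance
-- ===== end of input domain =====

-- B replaces A's group-then-concatenate (build topic→ids lists, sort the groups by size, flatten) by one
-- counting pass plus a single stable key-sort of the ids under the key (-topic_count, topic_first_index);
-- same cost class, different decomposition. Equivalence of the RETURN values is proved below on Pre_.

-- ===== PORT A =====
-- shared helper: models the Python expression tweet_anno_dict[id]['topic'] (appears in both A and B).
-- The default "" is only reached where Python raises KeyError; such inputs are excluded by Pre_ below.
def pyTopic (d : PySem.Dict String (List (String × String))) (id : String) : String :=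
  (PySem.Dict.ofList (d.getD id [])).getD "topic" ""

def sort_on_topic (tweet_anno_dict : List (String × List (String × String))) : List String :=
  let d := PySem.Dict.ofList tweet_anno_dict
  let topic_dict : PySem.Dict String (List String) :=
    d.keys.foldl (fun td id =>
      let topic := pyTopic d id
      let td' := if td.contains topic then td else td.insert topic ([] : List String)
      td'.modify topic [] (fun g => g ++ [id])) PySem.Dict.empty
  let temp_list := topic_dict.keys.foldl (fun acc t => acc ++ [topic_dict.getD t []]) ([] : List (List String))
  (PySem.List.sorted temp_list (fun g => (g.length : Int)) true).foldl (fun acc g => acc ++ g) ([] : List String)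

-- ===== PORT B =====
def sort_on_topic_alt (tweet_anno_dict : List (String × List (String × String))) : List String :=
  let d := PySem.Dict.ofList tweet_anno_dict
  let cf : PySem.Dict String Int × PySem.Dict String Int :=
    (PySem.List.enumerate d.keys 0).foldl (fun cf p =>
      let topic := pyTopic d p.2
      let cf' := if cf.1.contains topic then cf else (cf.1.insert topic 0, cf.2.insert topic p.1)
      (cf'.1.modify topic 0 (· + 1), cf'.2)) (PySem.Dict.empty, PySem.Dict.empty)
  PySem.List.sorted2 d.keys
    (fun id => -(cf.1.getD (pyTopic d id) 0)) (fun id => cf.2.getD (pyTopic d id) 0) false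

-- ===== PRECONDITION & SPEC =====
-- Pre_ excludes exactly the inputs where some annotation dict has no 'topic' key: there Python A
-- raises KeyError (no value is returned).
def Pre_sort_on_topic (tweet_anno_dict : List (String × List (String × String))) : Prop :=
  ((PySem.Dict.ofList tweet_anno_dict).items.all
    (fun p => (PySem.Dict.ofList p.2).contains "topic")) = true
instance (tweet_anno_dict : List (String × List (String × String))) : Decidable (Pre_sort_on_topic tweet_anno_dict) := by unfold Pre_sort_on_topic; infer_instance

def pvWitness_sort_on_topic : (List (String × List (String × String))) :=
  [("t1", [("topic", "a")]), ("t2", [("topic", "b")]), ("t3", [("topic", "a")])]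

def Spec_sort_on_topic (tweet_anno_dict : List (String × List (String × String))) (out : List String) : Prop := out = sort_on_topic_alt tweet_anno_dict
instance (tweet_anno_dict : List (String × List (String × String))) (out : List String) : Decidable (Spec_sort_on_topic tweet_anno_dict out) := by unfold Spec_sort_on_topic; infer_instance

-- ===== CLAIM (what is proved, stated in full; the proofs are below) =====
def Claim_equal_sort_on_topic : Prop := ∀ (tweet_anno_dict : List (String × List (String × String))), Dom_sort_on_topic tweet_anno_dict → Pre_sort_on_topic tweet_anno_dict → Spec_sort_on_topic tweet_anno_dict (sort_on_topic tweet_anno_dict)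

-- ===== LEMMAS AND PROOFS =====

-- proof-side abbreviations: the group of ids with a given topic, its size, the first index of a topic,
-- and the total strict order that BOTH outputs turn out to be sorted by.
def grpF (ks : List String) (T : String → String) (t : String) : List String :=
  ks.filter (fun id => T id == t)
def cntF (ks : List String) (T : String → String) (t : String) : Nat := (ks.map T).count t
def fiF (ks : List String) (T : String → String) (t : String) : Nat := List.idxOf t (ks.map T)
def RelF (ks : List String) (T : String → String) (a b : String) : Prop :=
  cntF ks T (T b) < cntF ks T (T a) ∨
    (cntF ks T (T a) = cntF ks T (T b) ∧
      (fiF ks T (T a) < fiF ks T (T b) ∨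
        (fiF ks T (T a) = fiF ks T (T b) ∧ List.idxOf a ks < List.idxOf b ks)))

theorem RelF_antisymm (ks : List String) (T : String → String) (a b : String)
    (hab : RelF ks T a b) (hba : RelF ks T b a) : a = b := by
  exfalso; unfold RelF at hab hba; omega

-- A's fold state, parametrised by the topic function
def buildA (T : String → String) (xs : List String) : PySem.Dict String (List String) :=
  xs.foldl (fun td id =>
    (if td.contains (T id) then td else td.insert (T id) ([] : List String)).modify
      (T id) [] (fun g => g ++ [id])) PySem.Dict.empty

-- B's fold state, parametrised by the topic function
def buildB (T : String → String) (xs : List String) :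
    PySem.Dict String Int × PySem.Dict String Int :=
  (PySem.List.enumerate xs 0).foldl (fun cf p =>
    ((if cf.1.contains (T p.2) then cf else (cf.1.insert (T p.2) 0, cf.2.insert (T p.2) p.1)).1.modify
        (T p.2) 0 (· + 1),
     (if cf.1.contains (T p.2) then cf else (cf.1.insert (T p.2) 0, cf.2.insert (T p.2) p.1)).2))
    (PySem.Dict.empty, PySem.Dict.empty)

theorem dedup_append_singleton {α : Type} [BEq α] [LawfulBEq α] (xs : List α) (a : α) :
    PySem.List.dedup (xs ++ [a]) =
      if a ∈ xs then PySem.List.dedup xs else PySem.List.dedup xs ++ [a] := by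
  simp only [PySem.List.dedup_eq_ofList]
  rw [PySem.Set.ofList_eq_foldl, List.foldl_append, ← PySem.Set.ofList_eq_foldl]
  simp [PySem.Set.add, PySem.Set.contains]

theorem buildA_spec (T : String → String) (xs : List String) :
    (buildA T xs).keys = PySem.List.dedup (xs.map T) ∧
      ∀ t, (buildA T xs).getD t [] = xs.filter (fun id => T id == t) := by
  induction xs using List.reverseRecOn with
  | nil =>
    constructor
    · simp [buildA, PySem.List.dedup_eq_ofList, PySem.Set.ofList, PySem.Set.empty,
        PySem.Dict.keys_empty]
    · intro t; simp [buildA, PySem.Dict.getD_empty]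
  | append_singleton xs x ih =>
    rcases ih with ⟨ihk, ihg⟩
    have hstep : buildA T (xs ++ [x]) =
        (if (buildA T xs).contains (T x) then buildA T xs
          else (buildA T xs).insert (T x) ([] : List String)).modify (T x) []
          (fun g => g ++ [x]) := by
      unfold buildA
      rw [List.foldl_append]
      simp only [List.foldl_cons, List.foldl_nil]
    by_cases hmem : T x ∈ xs.map T
    · have hct : (buildA T xs).contains (T x) = true := by
        rw [PySem.Dict.contains_iff_mem_keys, ihk, PySem.List.mem_dedup]
        exact hmem
      rw [hstep, hct, if_pos rfl]
      constructor
      · rw [PySem.Dict.keys_modify, PySem.Dict.keys_insert_of_contains _ _ hct, ihk,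
          List.map_append, List.map_cons, List.map_nil, dedup_append_singleton, if_pos hmem]
      · intro t
        by_cases ht : t = T x
        · subst ht
          rw [PySem.Dict.getD_modify_self, ihg, List.filter_append]
          simp
        · rw [PySem.Dict.getD_modify_of_ne _ _ _ ht, ihg, List.filter_append]
          have : ((T x == t) : Bool) = false := by simpa using fun h => ht h.symm
          simp [this]
    · have hcf : (buildA T xs).contains (T x) = false := by
        rw [Bool.eq_false_iff]
        intro hc
        rw [PySem.Dict.contains_iff_mem_keys, ihk, PySem.List.mem_dedup] at hc
        exact hmem hc
      rw [hstep, hcf]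
      rw [show (if (false : Bool) = true then buildA T xs
          else (buildA T xs).insert (T x) ([] : List String))
          = (buildA T xs).insert (T x) ([] : List String) from rfl]
      constructor
      · rw [PySem.Dict.keys_modify,
          PySem.Dict.keys_insert_of_contains _ _ (PySem.Dict.contains_insert_self _ _ _),
          PySem.Dict.keys_insert_of_not_contains _ _ hcf, ihk,
          List.map_append, List.map_cons, List.map_nil, dedup_append_singleton, if_neg hmem]
      · intro t
        by_cases ht : t = T x
        · subst ht
          rw [PySem.Dict.getD_modify_self, PySem.Dict.getD_insert_self, List.filter_append]
          have hnil : xs.filter (fun id => T id == T x) = [] := by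
            rw [List.filter_eq_nil_iff]
            intro a ha hTa
            exact hmem (by
              have hax : T a = T x := by simpa using hTa
              rw [← hax]
              exact List.mem_map_of_mem ha)
          rw [hnil]
          simp
        · rw [PySem.Dict.getD_modify_of_ne _ _ _ ht, PySem.Dict.getD_insert_of_ne _ _ _ ht, ihg,
            List.filter_append]
          have : ((T x == t) : Bool) = false := by simpa using fun h => ht h.symm
          simp [this]

theorem buildB_spec (T : String → String) (xs : List String) :
    ∀ t, ((buildB T xs).1.contains t = true ↔ t ∈ xs.map T) ∧
      (buildB T xs).1.getD t 0 = ((xs.map T).count t : Int) ∧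
      (t ∈ xs.map T → (buildB T xs).2.getD t 0 = (List.idxOf t (xs.map T) : Int)) := by
  induction xs using List.reverseRecOn with
  | nil =>
    intro t
    refine ⟨by simp [buildB, PySem.List.enumerate_nil, PySem.Dict.contains_empty], ?_, ?_⟩
    · simp [buildB, PySem.List.enumerate_nil, PySem.Dict.getD_empty]
    · intro h; simp at h
  | append_singleton xs x ih =>
    have hstep : buildB T (xs ++ [x]) =
        ((if (buildB T xs).1.contains (T x) then buildB T xs
            else ((buildB T xs).1.insert (T x) 0,
                  (buildB T xs).2.insert (T x) (0 + (xs.length : Int)))).1.modify (T x) 0 (· + 1),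
         (if (buildB T xs).1.contains (T x) then buildB T xs
            else ((buildB T xs).1.insert (T x) 0,
                  (buildB T xs).2.insert (T x) (0 + (xs.length : Int)))).2) := by
      unfold buildB
      rw [PySem.List.enumerate_append, List.foldl_append, PySem.List.enumerate_cons,
        PySem.List.enumerate_nil]
      simp only [List.foldl_cons, List.foldl_nil]
    intro t
    obtain ⟨ihc, ihn, ihf⟩ := ih t
    obtain ⟨ihcx, -, -⟩ := ih (T x)
    by_cases hmem : T x ∈ xs.map T
    · have hct : (buildB T xs).1.contains (T x) = true := ihcx.mpr hmem
      rw [hstep, hct, if_pos rfl]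
      refine ⟨?_, ?_, ?_⟩
      · rw [PySem.Dict.contains_modify]
        simp only [List.map_append, List.map_cons, List.map_nil, List.mem_append,
          List.mem_cons, List.not_mem_nil, or_false]
        constructor
        · intro h
          rcases Bool.or_eq_true_iff.mp h with h | h
          · exact Or.inr (by simpa using h)
          · exact Or.inl (ihc.mp h)
        · intro h
          rcases h with h | h
          · exact Bool.or_eq_true_iff.mpr (Or.inr (ihc.mpr h))
          · exact Bool.or_eq_true_iff.mpr (Or.inl (by simpa using h))
      · by_cases ht : t = T x
        · subst ht
          rw [PySem.Dict.getD_modify_self, ihn, List.map_append, List.count_append]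
          simp
        · rw [PySem.Dict.getD_modify_of_ne _ _ _ ht, ihn, List.map_append, List.count_append]
          have hne2 : ¬T x = t := fun h => ht h.symm
          simp [hne2]
      · intro hmem'
        rw [List.map_append] at hmem'
        have htmem : t ∈ xs.map T := by
          rcases List.mem_append.mp hmem' with h | h
          · exact h
          · rw [List.mem_singleton.mp h]; exact hmem
        rw [List.map_append, List.idxOf_append, if_pos htmem]
        exact ihf htmem
    · have hcf : (buildB T xs).1.contains (T x) = false := by
        rw [Bool.eq_false_iff]; intro hc; exact hmem (ihcx.mp hc)
      rw [hstep, hcf]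
      rw [show (if (false : Bool) = true then buildB T xs
          else ((buildB T xs).1.insert (T x) 0,
                (buildB T xs).2.insert (T x) (0 + (xs.length : Int))))
          = ((buildB T xs).1.insert (T x) 0,
             (buildB T xs).2.insert (T x) (0 + (xs.length : Int))) from rfl]
      refine ⟨?_, ?_, ?_⟩
      · rw [PySem.Dict.contains_modify, PySem.Dict.contains_insert]
        simp only [List.map_append, List.map_cons, List.map_nil, List.mem_append,
          List.mem_cons, List.not_mem_nil, or_false]
        constructor
        · intro h
          rcases Bool.or_eq_true_iff.mp h with h | h
          · exact Or.inr (by simpa using h)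
          · rcases Bool.or_eq_true_iff.mp h with h | h
            · exact Or.inr (by simpa using h)
            · exact Or.inl (ihc.mp h)
        · intro h
          rcases h with h | h
          · exact Bool.or_eq_true_iff.mpr (Or.inr (Bool.or_eq_true_iff.mpr (Or.inr (ihc.mpr h))))
          · exact Bool.or_eq_true_iff.mpr (Or.inl (by simpa using h))
      · by_cases ht : t = T x
        · subst ht
          rw [PySem.Dict.getD_modify_self, PySem.Dict.getD_insert_self, List.map_append,
            List.count_append]
          have h0 : (xs.map T).count (T x) = 0 := List.count_eq_zero.mpr hmem
          simp [h0]
        · rw [PySem.Dict.getD_modify_of_ne _ _ _ ht, PySem.Dict.getD_insert_of_ne _ _ _ ht, ihn,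
            List.map_append, List.count_append]
          have hne2 : ¬T x = t := fun h => ht h.symm
          simp [hne2]
      · intro hmem'
        by_cases ht : t = T x
        · subst ht
          rw [PySem.Dict.getD_insert_self, List.map_append, List.idxOf_append, if_neg hmem]
          simp
        · rw [List.map_append] at hmem'
          have htmem : t ∈ xs.map T := by
            rcases List.mem_append.mp hmem' with h | h
            · exact h
            · exact absurd (List.mem_singleton.mp h) ht
          rw [PySem.Dict.getD_insert_of_ne _ _ _ ht, List.map_append, List.idxOf_append,
            if_pos htmem]
          exact ihf htmem

theorem cntF_eq_grp_length (ks : List String) (T : String → String) (t : String) :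
    cntF ks T t = (grpF ks T t).length := by
  unfold cntF grpF
  rw [List.count_eq_countP, List.countP_map, List.countP_eq_length_filter]
  simp [Function.comp_def]

theorem insertBy_pairwise_of {α : Type} (S : List α) (bef : α → α → Bool) (R : α → α → Prop)
    (pos : α → Nat)
    (h1 : ∀ x ∈ S, ∀ y ∈ S, bef x y = true → R x y)
    (h2 : ∀ x ∈ S, ∀ y ∈ S, bef x y = false → pos y < pos x → R y x)
    (h3 : ∀ x ∈ S, ∀ y ∈ S, ∀ z ∈ S, bef x y = true → R y z → R x z)
    (x : α) (hx : x ∈ S) :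
    ∀ (acc : List α), (∀ y ∈ acc, y ∈ S) → acc.Pairwise R → (∀ y ∈ acc, pos y < pos x) →
      (PySem.List.insertBy bef x acc).Pairwise R := by
  intro acc
  induction acc with
  | nil =>
    intro _ _ _
    rw [show PySem.List.insertBy bef x [] = [x] from rfl]
    exact List.pairwise_singleton R x
  | cons y ys ih =>
    intro hsub hpw hpos
    rw [show PySem.List.insertBy bef x (y :: ys)
        = if bef x y then x :: y :: ys else y :: PySem.List.insertBy bef x ys from rfl]
    rcases List.pairwise_cons.mp hpw with ⟨hyz, hys⟩
    by_cases hb : bef x y = true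
    · rw [if_pos hb]
      refine List.pairwise_cons.mpr ⟨?_, hpw⟩
      intro z hz
      rcases List.mem_cons.mp hz with rfl | hz'
      · exact h1 x hx z (hsub z hz) hb
      · exact h3 x hx y (hsub y (List.mem_cons_self)) z (hsub z (List.mem_cons_of_mem y hz')) hb (hyz z hz')
    · rw [if_neg hb]
      refine List.pairwise_cons.mpr ⟨?_, ?_⟩
      · intro z hz
        rcases (PySem.List.mem_insertBy bef x z ys).mp hz with rfl | hz'
        · exact h2 z hx y (hsub y (List.mem_cons_self)) (by simpa using hb)
            (hpos y (List.mem_cons_self))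
        · exact hyz z hz'
      · exact ih (fun a ha => hsub a (List.mem_cons_of_mem y ha)) hys
          (fun a ha => hpos a (List.mem_cons_of_mem y ha))

theorem foldl_insertBy_pairwise {α : Type} (S : List α) (bef : α → α → Bool) (R : α → α → Prop)
    (pos : α → Nat)
    (h1 : ∀ x ∈ S, ∀ y ∈ S, bef x y = true → R x y)
    (h2 : ∀ x ∈ S, ∀ y ∈ S, bef x y = false → pos y < pos x → R y x)
    (h3 : ∀ x ∈ S, ∀ y ∈ S, ∀ z ∈ S, bef x y = true → R y z → R x z) :
    ∀ (xs acc : List α), (∀ y ∈ xs, y ∈ S) → (∀ y ∈ acc, y ∈ S) → acc.Pairwise R →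
      (∀ y ∈ acc, ∀ x ∈ xs, pos y < pos x) → xs.Pairwise (fun a b => pos a < pos b) →
      (xs.foldl (fun acc x => PySem.List.insertBy bef x acc) acc).Pairwise R := by
  intro xs
  induction xs with
  | nil => intro acc _ _ hpwacc _ _; simpa using hpwacc
  | cons x rest ih =>
    intro acc hxs hacc hpwacc hcross hpwxs
    rcases List.pairwise_cons.mp hpwxs with ⟨hxrest, hrest⟩
    simp only [List.foldl_cons]
    refine ih (PySem.List.insertBy bef x acc)
      (fun a ha => hxs a (List.mem_cons_of_mem x ha)) ?_ ?_ ?_ hrest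
    · intro a ha
      rcases (PySem.List.mem_insertBy bef x a acc).mp ha with rfl | ha'
      · exact hxs a (List.mem_cons_self)
      · exact hacc a ha'
    · exact insertBy_pairwise_of S bef R pos h1 h2 h3 x (hxs x (List.mem_cons_self)) acc hacc
        hpwacc (fun a ha => hcross a ha x (List.mem_cons_self))
    · intro a ha z hz
      rcases (PySem.List.mem_insertBy bef x a acc).mp ha with rfl | ha'
      · exact hxrest z hz
      · exact hcross a ha' z (List.mem_cons_of_mem x hz)

theorem nodup_pairwise_idxOf {α : Type} [BEq α] [LawfulBEq α] (xs : List α) (h : xs.Nodup) :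
    xs.Pairwise (fun a b => List.idxOf a xs < List.idxOf b xs) := by
  rw [List.pairwise_iff_getElem]
  intro i j hi hj hij
  rw [h.idxOf_getElem i hi, h.idxOf_getElem j hj]; exact hij

theorem dedup_pairwise_idxOf {α : Type} [BEq α] [LawfulBEq α] (xs : List α) :
    (PySem.List.dedup xs).Pairwise (fun a b => List.idxOf a xs < List.idxOf b xs) := by
  induction xs using List.reverseRecOn with
  | nil => simp [PySem.List.dedup_eq_ofList, PySem.Set.ofList, PySem.Set.empty]
  | append_singleton xs a ih =>
    rw [dedup_append_singleton]
    by_cases hmem : a ∈ xs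
    · rw [if_pos hmem]
      refine List.Pairwise.imp_of_mem ?_ ih
      intro b c hb hc h
      rw [List.idxOf_append, List.idxOf_append,
        if_pos ((PySem.List.mem_dedup xs b).mp hb), if_pos ((PySem.List.mem_dedup xs c).mp hc)]
      exact h
    · rw [if_neg hmem, List.pairwise_append]
      refine ⟨?_, List.pairwise_singleton _ _, ?_⟩
      · refine List.Pairwise.imp_of_mem ?_ ih
        intro b c hb hc h
        rw [List.idxOf_append, List.idxOf_append,
          if_pos ((PySem.List.mem_dedup xs b).mp hb), if_pos ((PySem.List.mem_dedup xs c).mp hc)]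
        exact h
      · intro b hb c hc
        rw [List.mem_singleton.mp hc]
        have hbx := (PySem.List.mem_dedup xs b).mp hb
        rw [List.idxOf_append, List.idxOf_append, if_pos hbx, if_neg hmem]
        have := List.idxOf_lt_length_of_mem hbx
        simp
        omega

theorem flatMap_cons_perm (id : String) (f : String → List String) (c : String) :
    ∀ (D : List String), D.Nodup → c ∈ D →
      (D.flatMap (fun t => if c = t then id :: f t else f t)).Perm (id :: D.flatMap f) := by
  intro D
  induction D with
  | nil => intro _ hc; exact absurd hc (List.not_mem_nil)
  | cons t D' ih =>
    intro hnd hc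
    rcases List.nodup_cons.mp hnd with ⟨htD, hnd'⟩
    simp only [List.flatMap_cons]
    by_cases hct : c = t
    · subst hct
      rw [if_pos rfl]
      have hrest : D'.flatMap (fun t => if c = t then id :: f t else f t) = D'.flatMap f := by
        rw [List.flatMap_def, List.flatMap_def]
        exact congrArg List.flatten
          (List.map_congr_left (fun t' ht' => if_neg (fun h => htD (by rw [h]; exact ht'))))
      rw [hrest]
      exact List.Perm.refl _
    · rw [if_neg hct]
      have hcD' : c ∈ D' := (List.mem_cons.mp hc).resolve_left hct
      exact (List.Perm.append_left (f t) (ih hnd' hcD')).trans List.perm_middle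

theorem flatMap_filter_perm (T : String → String) :
    ∀ (ks D : List String), D.Nodup → (∀ id ∈ ks, T id ∈ D) →
      (D.flatMap (fun t => ks.filter (fun id => T id == t))).Perm ks := by
  intro ks
  induction ks with
  | nil => intro D _ _; simp
  | cons id rest ih =>
    intro D hnd hcov
    have hc : T id ∈ D := hcov id (List.mem_cons_self)
    have step : (D.flatMap (fun t => (id :: rest).filter (fun i => T i == t)))
        = D.flatMap (fun t => if T id = t then id :: rest.filter (fun i => T i == t)
            else rest.filter (fun i => T i == t)) := by
      rw [List.flatMap_def, List.flatMap_def]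
      refine congrArg List.flatten (List.map_congr_left ?_)
      intro t _
      rw [List.filter_cons]
      by_cases h : T id = t
      · rw [if_pos (by simpa using h), if_pos h]
      · rw [if_neg (by simpa using h), if_neg h]
    rw [step]
    exact (flatMap_cons_perm id _ (T id) D hnd hc).trans
      (List.Perm.cons id (ih D hnd (fun i hi => hcov i (List.mem_cons_of_mem id hi))))

theorem ports_agree (l : List (String × List (String × String))) :
    sort_on_topic l = sort_on_topic_alt l := by
  set d := PySem.Dict.ofList l with hd
  set T := pyTopic d with hT
  set ks := d.keys with hksdef
  have hnd : ks.Nodup := PySem.Dict.nodup_keys_ofList l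
  obtain ⟨hk, hg⟩ := buildA_spec T ks
  set D := PySem.List.dedup (ks.map T) with hD
  set k1 : String → Int := fun id => -((buildB T ks).1.getD (T id) 0) with hk1def
  set k2 : String → Int := fun id => (buildB T ks).2.getD (T id) 0 with hk2def
  have hA : sort_on_topic l =
      (PySem.List.sorted ((buildA T ks).keys.map (fun t => (buildA T ks).getD t []))
        (fun g => (g.length : Int)) true).flatten := by
    simp only [sort_on_topic, PySem.List.foldl_append_singleton_eq_map,
      PySem.List.foldl_append_eq_flatten, List.nil_append]
    rfl
  have hB : sort_on_topic_alt l = PySem.List.sorted2 ks k1 k2 false := rfl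
  have hmap : (buildA T ks).keys.map (fun t => (buildA T ks).getD t [])
      = D.map (fun t => grpF ks T t) := by
    rw [hk]
    exact List.map_congr_left (fun t _ => by rw [hg t]; rfl)
  rw [hA, hB, hmap]
  -- keys of B's sort, expressed through counts and first indices (for ids in ks)
  have hk1 : ∀ id ∈ ks, k1 id = -((cntF ks T (T id) : Int)) := by
    intro id _
    show -((buildB T ks).1.getD (T id) 0) = _
    rw [(buildB_spec T ks (T id)).2.1]
    rfl
  have hk2 : ∀ id ∈ ks, k2 id = (fiF ks T (T id) : Int) := by
    intro id hid
    show (buildB T ks).2.getD (T id) 0 = _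
    rw [(buildB_spec T ks (T id)).2.2 (List.mem_map_of_mem hid)]
    rfl
  -- B's output is sorted by RelF
  have hpwB : (PySem.List.sorted2 ks k1 k2 false).Pairwise (RelF ks T) := by
    rw [show PySem.List.sorted2 ks k1 k2 false = ks.foldl (fun acc x =>
        PySem.List.insertBy (fun a b =>
          decide (k1 a < k1 b) || (!decide (k1 b < k1 a) && decide (k2 a < k2 b))) x acc) []
      from rfl]
    refine foldl_insertBy_pairwise ks _ (RelF ks T) (fun id => List.idxOf id ks)
      ?_ ?_ ?_ ks [] (fun y hy => hy) (by simp) List.Pairwise.nil (by simp)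
      (nodup_pairwise_idxOf ks hnd)
    · intro x hx y hy hb
      rw [hk1 x hx, hk1 y hy, hk2 x hx, hk2 y hy] at hb
      simp at hb
      unfold RelF
      omega
    · intro x hx y hy hb hpos
      rw [hk1 x hx, hk1 y hy, hk2 x hx, hk2 y hy] at hb
      simp at hb
      have hpos' : List.idxOf y ks < List.idxOf x ks := hpos
      unfold RelF
      omega
    · intro x hx y hy z hz hb hyz
      rw [hk1 x hx, hk1 y hy, hk2 x hx, hk2 y hy] at hb
      simp at hb
      unfold RelF at hyz ⊢
      omega
  -- the position of a group = first index of its topic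
  have hposG : ∀ t ∈ D, List.idxOf (T ((grpF ks T t).headD "")) (ks.map T)
      = List.idxOf t (ks.map T) := by
    intro t ht
    have htm : t ∈ ks.map T := (PySem.List.mem_dedup _ _).mp ht
    obtain ⟨id0, hid0, rfl⟩ := List.mem_map.mp htm
    have hmemf : id0 ∈ grpF ks T (T id0) := List.mem_filter.mpr ⟨hid0, by simp⟩
    cases hgr : grpF ks T (T id0) with
    | nil => rw [hgr] at hmemf; exact absurd hmemf (List.not_mem_nil)
    | cons a rest =>
      have ha : a ∈ grpF ks T (T id0) := by rw [hgr]; exact List.mem_cons_self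
      have hTa : T a = T id0 := by simpa [grpF] using (List.mem_filter.mp ha).2
      simp only [List.headD_cons, hTa]
  -- A's list of groups, reverse-sorted by size, is sorted by (size desc, first appearance)
  have hpwG : (PySem.List.sorted (D.map (fun t => grpF ks T t)) (fun g => (g.length : Int))
        true).Pairwise (fun G G' => G'.length < G.length ∨ (G.length = G'.length ∧
          List.idxOf (T (G.headD "")) (ks.map T) < List.idxOf (T (G'.headD "")) (ks.map T))) := by
    rw [PySem.List.sorted_rev_eq_foldl_insertBy]
    refine foldl_insertBy_pairwise (D.map (fun t => grpF ks T t)) _ _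
      (fun G => List.idxOf (T (G.headD "")) (ks.map T)) ?_ ?_ ?_ _ []
      (fun y hy => hy) (by simp) List.Pairwise.nil (by simp) ?_
    · intro x _ y _ hb
      simp at hb
      omega
    · intro x _ y _ hb hpos
      simp at hb
      have hpos' : List.idxOf (T (y.headD "")) (ks.map T) < List.idxOf (T (x.headD "")) (ks.map T) := hpos
      omega
    · intro x _ y _ z _ hb hyz
      simp at hb
      omega
    · rw [List.pairwise_map]
      refine List.Pairwise.imp_of_mem ?_ (dedup_pairwise_idxOf (ks.map T))
      intro a b ha hb h
      show List.idxOf (T ((grpF ks T a).headD "")) (ks.map T)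
          < List.idxOf (T ((grpF ks T b).headD "")) (ks.map T)
      rw [hposG a ha, hposG b hb]
      exact h
  -- hence A's flattened output is sorted by RelF
  have hpwA : ((PySem.List.sorted (D.map (fun t => grpF ks T t)) (fun g => (g.length : Int))
        true).flatten).Pairwise (RelF ks T) := by
    rw [List.pairwise_flatten]
    constructor
    · intro G hG
      rw [PySem.List.mem_sorted] at hG
      obtain ⟨t, htD, rfl⟩ := List.mem_map.mp hG
      refine List.Pairwise.imp_of_mem ?_
        (List.Pairwise.sublist List.filter_sublist (nodup_pairwise_idxOf ks hnd))
      intro a b ha hb hidx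
      have hTa : T a = t := by simpa [grpF] using (List.mem_filter.mp ha).2
      have hTb : T b = t := by simpa [grpF] using (List.mem_filter.mp hb).2
      unfold RelF
      rw [hTa, hTb]
      exact Or.inr ⟨rfl, Or.inr ⟨rfl, hidx⟩⟩
    · refine List.Pairwise.imp_of_mem ?_ hpwG
      intro G G' hG hG' hRG
      rw [PySem.List.mem_sorted] at hG hG'
      obtain ⟨t, htD, rfl⟩ := List.mem_map.mp hG
      obtain ⟨t', htD', rfl⟩ := List.mem_map.mp hG'
      intro a ha b hb
      have hTa : T a = t := by simpa [grpF] using (List.mem_filter.mp ha).2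
      have hTb : T b = t' := by simpa [grpF] using (List.mem_filter.mp hb).2
      unfold RelF
      rw [hTa, hTb]
      rcases hRG with h | ⟨hlen, hpos⟩
      · left
        rw [cntF_eq_grp_length, cntF_eq_grp_length]
        exact h
      · right
        refine ⟨by rw [cntF_eq_grp_length, cntF_eq_grp_length]; exact hlen, Or.inl ?_⟩
        rw [hposG t htD, hposG t' htD'] at hpos
        unfold fiF
        exact hpos
  -- both outputs are permutations of ks
  have hpermA : ((PySem.List.sorted (D.map (fun t => grpF ks T t)) (fun g => (g.length : Int))
        true).flatten).Perm ks := by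
    refine (List.Perm.flatten (PySem.List.sorted_perm _ _ _)).trans ?_
    rw [← List.flatMap_def]
    have hfun : (fun t => grpF ks T t) = (fun t => ks.filter (fun id => T id == t)) := rfl
    rw [hfun]
    exact flatMap_filter_perm T ks D (PySem.List.nodup_dedup _)
      (fun id hid => (PySem.List.mem_dedup _ _).mpr (List.mem_map_of_mem hid))
  have hpermB : (PySem.List.sorted2 ks k1 k2 false).Perm ks :=
    PySem.List.sorted2_perm ks k1 k2 false
  exact List.Perm.eq_of_pairwise (fun a b _ _ hab hba => RelF_antisymm ks T a b hab hba)
    hpwA hpwB (hpermA.trans hpermB.symm)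

-- ===== VERDICT (by name: the statement is the Claim_ definition above) =====
theorem sort_on_topic_spec : Claim_equal_sort_on_topic := by
  intro l _ _
  unfold Spec_sort_on_topic
  exact ports_agree l
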